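-- pv_equiv track=rewrite | github.com/hrouhizadeh/multilingual_concept_normalization | src/dataset_prepocessing/utils.py | extract_semantic_types_groups
-- ===== SOURCE A (Python) =====
-- from typing import Any, Dict, List, Optional, Set, Union
--
-- def extract_semantic_types_groups(
--     codes: List[str],
--     semantic_mapping: Dict[str, Dict]
-- ) -> tuple:
--     """
--     Extract semantic types and groups for given CUI codes.
--
--     Args:
--         codes: List of UMLS CUI codes
--         semantic_mapping: Dict mapping CUI to {sem_type: [...], sem_group: [...]}
--
--     Returns:
--         Tuple of (unique_sem_types, unique_sem_groups)
--     """
--     s_groups = []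
--     s_types = []
--
--     for cui in codes:
--         if cui not in semantic_mapping:
--             continue
--         s_groups.append(semantic_mapping[cui].get('sem_group', []))
--         s_types.append(semantic_mapping[cui].get('sem_type', []))
--
--     # Flatten nested lists
--     s_types = flatten_list(s_types)
--     s_groups = flatten_list(s_groups)
--
--     # Remove duplicates while preserving order
--     s_types = list(dict.fromkeys(s_types))
--     s_groups = list(dict.fromkeys(s_groups))
--
--     return s_types, s_groups
--
-- def flatten_list(nested_list: List) -> List:
--     """
--     Recursively flatten a nested list.
--
--     Args:
--         nested_list: A potentially nested list
--
--     Returns: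
--         Flattened list
--     """
--     flat_list = []
--     for element in nested_list:
--         if isinstance(element, list):
--             flat_list.extend(flatten_list(element))
--         else:
--             flat_list.append(element)
--     return flat_list
-- ===== SOURCE B (Python) =====
-- def extract_semantic_types_groups(codes, semantic_mapping):
--     # Collect and flatten in comprehensions (iterative stack-based flatten),
--     # then dedupe by first-occurrence index test on the prefix -- no dict/set.
--     types_flat = [t for cui in codes if cui in semantic_mapping
--                   for t in _flatten_iter(semantic_mapping[cui].get('sem_type', []))]
--     groups_flat = [g for cui in codes if cui in semantic_mapping
--                    for g in _flatten_iter(semantic_mapping[cui].get('sem_group', []))]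
--     s_types = [x for i, x in enumerate(types_flat) if x not in types_flat[:i]]
--     s_groups = [x for i, x in enumerate(groups_flat) if x not in groups_flat[:i]]
--     return s_types, s_groups
--
--
-- def _flatten_iter(value):
--     """Flatten an arbitrarily nested list (or bare value) with an explicit stack."""
--     out = []
--     stack = [value]
--     while stack:
--         e = stack.pop()
--         if isinstance(e, list):
--             stack.extend(reversed(e))
--         else:
--             out.append(e)
--     return out
-- ===== Notes on version B (the rewrite author's own statement) =====
-- stated objective: alternative
-- what changed: Replaces A's recursive flatten plus dict.fromkeys ordered-set dedup with an explicit-stack iterative flatten and a prefix-membership dedup ([x for i,x in enumerate(xs) if x not in xs[:i]]) that uses no dict or set at all; collection is done by guarded comprehensions instead of an append loop.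
import Mathlib
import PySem

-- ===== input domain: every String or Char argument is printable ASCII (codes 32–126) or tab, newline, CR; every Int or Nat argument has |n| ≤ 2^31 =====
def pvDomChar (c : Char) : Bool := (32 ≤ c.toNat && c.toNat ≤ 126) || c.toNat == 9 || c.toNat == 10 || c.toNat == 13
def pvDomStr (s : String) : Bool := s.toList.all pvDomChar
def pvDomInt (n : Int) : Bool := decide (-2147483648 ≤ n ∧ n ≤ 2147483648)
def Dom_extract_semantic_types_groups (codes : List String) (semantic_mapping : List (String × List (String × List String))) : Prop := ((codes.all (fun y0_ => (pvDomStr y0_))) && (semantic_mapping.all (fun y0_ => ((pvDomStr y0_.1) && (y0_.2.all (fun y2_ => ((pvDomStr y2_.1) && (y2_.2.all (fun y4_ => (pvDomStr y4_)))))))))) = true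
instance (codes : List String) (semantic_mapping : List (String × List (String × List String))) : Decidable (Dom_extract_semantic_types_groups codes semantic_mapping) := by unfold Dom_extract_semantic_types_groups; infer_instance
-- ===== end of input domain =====

-- B replaces A's recursive flatten + dict.fromkeys dedup with an explicit-stack
-- iterative flatten and a prefix-membership (xs[:i]) dedup using no dict/set; same return value.
-- ===== PORT A =====
-- flatten_list on the typed input has nesting depth 2: the outer call sees lists
-- (isinstance(element, list) is true, recurse), the inner call sees strings (append).
def pvFlattenInner (l : List String) : List String :=
  l.foldl (fun acc e => acc ++ [e]) []
def pvFlattenOuter (ll : List (List String)) : List String :=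
  ll.foldl (fun acc e => acc ++ pvFlattenInner e) []
def extract_semantic_types_groups (codes : List String) (semantic_mapping : List (String × List (String × List String))) : List String × List String :=
  -- the loop: s_groups/s_types collect semantic_mapping[cui].get(…, []) for present cuis
  let acc := codes.foldl (fun (p : List (List String) × List (List String)) cui =>
      match (PySem.Dict.mk semantic_mapping).get? cui with
      | none => p  -- 'if cui not in semantic_mapping: continue'
      | some d => (p.1 ++ [(PySem.Dict.mk d).getD "sem_group" []],
                   p.2 ++ [(PySem.Dict.mk d).getD "sem_type" []])) ([], [])
  let s_types := PySem.List.dedup (pvFlattenOuter acc.2)   -- list(dict.fromkeys(flatten_list(s_types)))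
  let s_groups := PySem.List.dedup (pvFlattenOuter acc.1)
  (s_types, s_groups)

-- ===== PORT B =====
-- _flatten_iter on the typed input: the first pop sees the list and pushes its
-- elements (reversed, so they pop in order); every later pop sees a string leaf.
def pvFlatLoop : List String → List String → List String
  | out, [] => out
  | out, e :: stack => pvFlatLoop (out ++ [e]) stack
def pvFlatIter (v : List String) : List String := pvFlatLoop [] v
def extract_semantic_types_groups_alt (codes : List String) (semantic_mapping : List (String × List (String × List String))) : List String × List String :=
  -- the two collection comprehensions
  let types_flat := codes.flatMap (fun cui =>
      match (PySem.Dict.mk semantic_mapping).get? cui with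
      | none => []
      | some d => pvFlatIter ((PySem.Dict.mk d).getD "sem_type" []))
  let groups_flat := codes.flatMap (fun cui =>
      match (PySem.Dict.mk semantic_mapping).get? cui with
      | none => []
      | some d => pvFlatIter ((PySem.Dict.mk d).getD "sem_group" []))
  -- [x for i, x in enumerate(xs) if x not in xs[:i]]
  let s_types := (PySem.List.enumerate types_flat).foldl
      (fun acc p => if p.2 ∈ PySem.List.slice types_flat none (some p.1) then acc else acc ++ [p.2]) []
  let s_groups := (PySem.List.enumerate groups_flat).foldl
      (fun acc p => if p.2 ∈ PySem.List.slice groups_flat none (some p.1) then acc else acc ++ [p.2]) []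
  (s_types, s_groups)

-- ===== PRECONDITION & SPEC =====
def Spec_extract_semantic_types_groups (codes : List String) (semantic_mapping : List (String × List (String × List String))) (out : List String × List String) : Prop := out = extract_semantic_types_groups_alt codes semantic_mapping
instance (codes : List String) (semantic_mapping : List (String × List (String × List String))) (out : List String × List String) : Decidable (Spec_extract_semantic_types_groups codes semantic_mapping out) := by unfold Spec_extract_semantic_types_groups; infer_instance

-- ===== CLAIM =====
def Claim_equal_extract_semantic_types_groups : Prop := ∀ (codes : List String) (semantic_mapping : List (String × List (String × List String))), Dom_extract_semantic_types_groups codes semantic_mapping → Spec_extract_semantic_types_groups codes semantic_mapping (extract_semantic_types_groups codes semantic_mapping)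

-- ===== LEMMAS AND PROOFS =====
-- per-cui leaf lists (proof-only helpers)
def pvTL (semantic_mapping : List (String × List (String × List String))) (cui : String) : List String :=
  match (PySem.Dict.mk semantic_mapping).get? cui with
  | none => []
  | some d => (PySem.Dict.mk d).getD "sem_type" []
def pvGL (semantic_mapping : List (String × List (String × List String))) (cui : String) : List String :=
  match (PySem.Dict.mk semantic_mapping).get? cui with
  | none => []
  | some d => (PySem.Dict.mk d).getD "sem_group" []
def pvT? (semantic_mapping : List (String × List (String × List String))) (cui : String) : Option (List String) :=
  ((PySem.Dict.mk semantic_mapping).get? cui).map (fun d => (PySem.Dict.mk d).getD "sem_type" [])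
def pvG? (semantic_mapping : List (String × List (String × List String))) (cui : String) : Option (List String) :=
  ((PySem.Dict.mk semantic_mapping).get? cui).map (fun d => (PySem.Dict.mk d).getD "sem_group" [])

theorem pvFlattenInner_eq (l : List String) : pvFlattenInner l = l := by
  have h : ∀ (l acc : List String), l.foldl (fun a e => a ++ [e]) acc = acc ++ l := by
    intro l
    induction l with
    | nil => simp
    | cons x xs ih => intro acc; simp [List.foldl, ih]
  simpa [pvFlattenInner] using h l []

theorem pvFlattenOuter_eq (ll : List (List String)) : pvFlattenOuter ll = ll.flatten := by
  have h : ∀ (ll : List (List String)) (acc : List String),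
      ll.foldl (fun a e => a ++ pvFlattenInner e) acc = acc ++ ll.flatten := by
    intro ll
    induction ll with
    | nil => simp
    | cons x xs ih =>
        intro acc
        rw [List.foldl_cons, ih, pvFlattenInner_eq, List.flatten_cons, List.append_assoc]
  simpa [pvFlattenOuter] using h ll []

-- A's collecting loop produces exactly the per-present-cui value lists, in order
theorem pvA_fold (semantic_mapping : List (String × List (String × List String))) :
    ∀ (codes : List String) (gs ts : List (List String)),
      codes.foldl (fun (p : List (List String) × List (List String)) cui =>
        match (PySem.Dict.mk semantic_mapping).get? cui with
        | none => p
        | some d => (p.1 ++ [(PySem.Dict.mk d).getD "sem_group" []],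
                     p.2 ++ [(PySem.Dict.mk d).getD "sem_type" []])) (gs, ts)
      = (gs ++ codes.filterMap (pvG? semantic_mapping),
         ts ++ codes.filterMap (pvT? semantic_mapping)) := by
  intro codes
  induction codes with
  | nil => intro gs ts; simp
  | cons c cs ih =>
      intro gs ts
      cases h : (PySem.Dict.mk semantic_mapping).get? c with
      | none => simp [List.foldl, h, ih, pvG?, pvT?]
      | some d => simp [List.foldl, h, ih, pvG?, pvT?]

theorem pvFlatten_filterMap_T (semantic_mapping : List (String × List (String × List String)))
    (codes : List String) :
    (codes.filterMap (pvT? semantic_mapping)).flatten = codes.flatMap (pvTL semantic_mapping) := by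
  induction codes with
  | nil => simp
  | cons c cs ih =>
      cases h : (PySem.Dict.mk semantic_mapping).get? c with
      | none =>
          have hc : pvT? semantic_mapping c = none := by simp [pvT?, h]
          have hl : pvTL semantic_mapping c = [] := by simp [pvTL, h]
          simp [hc, hl, ih]
      | some d =>
          have hc : pvT? semantic_mapping c = some ((PySem.Dict.mk d).getD "sem_type" []) := by
            simp [pvT?, h]
          have hl : pvTL semantic_mapping c = (PySem.Dict.mk d).getD "sem_type" [] := by
            simp [pvTL, h]
          simp [hc, hl, ih]

theorem pvFlatten_filterMap_G (semantic_mapping : List (String × List (String × List String)))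
    (codes : List String) :
    (codes.filterMap (pvG? semantic_mapping)).flatten = codes.flatMap (pvGL semantic_mapping) := by
  induction codes with
  | nil => simp
  | cons c cs ih =>
      cases h : (PySem.Dict.mk semantic_mapping).get? c with
      | none =>
          have hc : pvG? semantic_mapping c = none := by simp [pvG?, h]
          have hl : pvGL semantic_mapping c = [] := by simp [pvGL, h]
          simp [hc, hl, ih]
      | some d =>
          have hc : pvG? semantic_mapping c = some ((PySem.Dict.mk d).getD "sem_group" []) := by
            simp [pvG?, h]
          have hl : pvGL semantic_mapping c = (PySem.Dict.mk d).getD "sem_group" [] := by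
            simp [pvGL, h]
          simp [hc, hl, ih]

-- B's iterative flatten is the identity on the (depth-1 typed) input
theorem pvFlatLoop_eq : ∀ (stack out : List String), pvFlatLoop out stack = out ++ stack := by
  intro stack
  induction stack with
  | nil => intro out; simp [pvFlatLoop]
  | cons e st ih => intro out; simp [pvFlatLoop, ih]

theorem pvFlatIter_eq (v : List String) : pvFlatIter v = v := by
  simp [pvFlatIter, pvFlatLoop_eq]

-- B's flattened collections are the same flatMaps as A's
theorem pvB_collect_T (semantic_mapping : List (String × List (String × List String)))
    (codes : List String) :
    codes.flatMap (fun cui =>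
      match (PySem.Dict.mk semantic_mapping).get? cui with
      | none => []
      | some d => pvFlatIter ((PySem.Dict.mk d).getD "sem_type" []))
    = codes.flatMap (pvTL semantic_mapping) := by
  apply List.flatMap_congr
  intro cui _
  cases h : (PySem.Dict.mk semantic_mapping).get? cui with
  | none => simp [pvTL, h]
  | some d => simp [pvTL, h, pvFlatIter_eq]

theorem pvB_collect_G (semantic_mapping : List (String × List (String × List String)))
    (codes : List String) :
    codes.flatMap (fun cui =>
      match (PySem.Dict.mk semantic_mapping).get? cui with
      | none => []
      | some d => pvFlatIter ((PySem.Dict.mk d).getD "sem_group" []))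
    = codes.flatMap (pvGL semantic_mapping) := by
  apply List.flatMap_congr
  intro cui _
  cases h : (PySem.Dict.mk semantic_mapping).get? cui with
  | none => simp [pvGL, h]
  | some d => simp [pvGL, h, pvFlatIter_eq]

-- the prefix-membership dedup equals dict.fromkeys dedup
theorem pvDedupIdx_aux (xs : List String) :
    ∀ (ys pre : List String), pre ++ ys = xs →
      (PySem.List.enumerate ys (pre.length : Int)).foldl
        (fun acc p => if p.2 ∈ PySem.List.slice xs none (some p.1) then acc else acc ++ [p.2])
        (PySem.List.dedup pre)
      = PySem.List.dedup xs := by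
  intro ys
  induction ys with
  | nil => intro pre h; simp [PySem.List.enumerate_nil, ← h]
  | cons y ys ih =>
      intro pre h
      rw [PySem.List.enumerate_cons, List.foldl_cons]
      have hslice : PySem.List.slice xs none (some (pre.length : Int)) = pre := by
        rw [PySem.List.slice_to_natCast, ← h, List.take_left]
      have hstep : (if y ∈ PySem.List.slice xs none (some (pre.length : Int))
          then PySem.List.dedup pre else PySem.List.dedup pre ++ [y])
          = PySem.List.dedup (pre ++ [y]) := by
        rw [hslice]
        simp only [PySem.List.dedup_eq_ofList, PySem.Set.ofList_eq_foldl, List.foldl_append,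
          List.foldl_cons, List.foldl_nil]
        rw [← PySem.Set.ofList_eq_foldl]
        by_cases hy : y ∈ pre
        · simp [PySem.Set.add, PySem.Set.contains, PySem.Set.mem_ofList, hy]
        · simp [PySem.Set.add, PySem.Set.contains, PySem.Set.mem_ofList, hy]
      rw [hstep]
      have := ih (pre ++ [y]) (by simpa using h)
      simpa [List.length_append, Int.natCast_add] using this

theorem pvDedupIdx_eq (xs : List String) :
    (PySem.List.enumerate xs).foldl
      (fun acc p => if p.2 ∈ PySem.List.slice xs none (some p.1) then acc else acc ++ [p.2]) []
    = PySem.List.dedup xs := by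
  have := pvDedupIdx_aux xs xs [] (by simp)
  simpa [PySem.List.dedup] using this

-- ===== VERDICT =====
theorem extract_semantic_types_groups_spec : Claim_equal_extract_semantic_types_groups := by
  intro codes semantic_mapping _
  unfold Spec_extract_semantic_types_groups
  unfold extract_semantic_types_groups extract_semantic_types_groups_alt
  rw [pvA_fold]
  simp only [pvFlattenOuter_eq, List.nil_append]
  rw [pvFlatten_filterMap_T, pvFlatten_filterMap_G, pvB_collect_T, pvB_collect_G,
    pvDedupIdx_eq, pvDedupIdx_eq]
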